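-- pv_equiv track=rewrite | github.com/AltaPayr011/rds-timesheet-system | timesheet_app.py | find_employee_key
-- ===== SOURCE A (Python) =====
-- def find_employee_key(full_name, employee_data):
--     # Try exact match first
--     test_key = full_name.replace(" ", "_")
--     if test_key in employee_data:
--         return test_key
--
--     # Normalize the input name for comparison
--     full_name_lower = full_name.lower()
--
--     # Try case-insensitive matching
--     for key, emp in employee_data.items():
--         emp_full_name = f"{emp['first_name']} {emp['last_name']}"
--         if emp_full_name.lower() == full_name_lower:
--             return key
--
--     # Try fuzzy matching for common variations (Jansen/Janse, van/Van)
--     for key, emp in employee_data.items():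
--         emp_full_name = f"{emp['first_name']} {emp['last_name']}"
--         emp_full_name_normalized = emp_full_name.lower().replace("jansen", "janse").replace("janse", "janse")
--         full_name_normalized = full_name_lower.replace("jansen", "janse").replace("janse", "janse")
--
--         if emp_full_name_normalized == full_name_normalized:
--             return key
--
--     return None
-- ===== SOURCE B (Python) =====
-- def find_employee_key(full_name, employee_data):
--     # Exact key match first, as before
--     test_key = full_name.replace(" ", "_")
--     if test_key in employee_data:
--         return test_key
--     # One pass: build first-wins indexes for the exact-lowercase and fuzzy names
--     exact_map = {}
--     fuzzy_map = {}
--     for key, emp in employee_data.items():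
--         name = f"{emp['first_name']} {emp['last_name']}".lower()
--         exact_map.setdefault(name, key)
--         fuzzy_map.setdefault(name.replace("jansen", "janse"), key)
--     target = full_name.lower()
--     if target in exact_map:
--         return exact_map[target]
--     return fuzzy_map.get(target.replace("jansen", "janse"))
-- ===== Notes on version B (the rewrite author's own statement) =====
-- stated objective: alternative
-- what changed: Replaces A's two sequential scans (case-insensitive then fuzzy) by a single pass that builds two first-wins hash indexes with setdefault, followed by O(1) dictionary lookups.
import Mathlib
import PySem

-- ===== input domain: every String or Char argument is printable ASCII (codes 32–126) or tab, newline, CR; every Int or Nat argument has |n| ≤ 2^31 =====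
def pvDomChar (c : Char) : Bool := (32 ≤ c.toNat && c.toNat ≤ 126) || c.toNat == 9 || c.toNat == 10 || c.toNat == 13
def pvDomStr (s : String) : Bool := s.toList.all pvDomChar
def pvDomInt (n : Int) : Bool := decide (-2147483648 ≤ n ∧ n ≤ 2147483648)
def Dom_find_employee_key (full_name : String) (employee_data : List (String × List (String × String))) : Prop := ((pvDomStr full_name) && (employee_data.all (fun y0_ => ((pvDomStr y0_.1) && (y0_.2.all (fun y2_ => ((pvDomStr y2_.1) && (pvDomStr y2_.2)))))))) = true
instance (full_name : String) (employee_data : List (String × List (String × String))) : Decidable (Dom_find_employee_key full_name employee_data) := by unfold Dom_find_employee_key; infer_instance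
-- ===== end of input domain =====

-- B replaces A's two sequential scans by one pass building two first-wins indexes (setdefault) plus O(1) lookups.


-- ===== PORT A =====
-- f"{emp['first_name']} {emp['last_name']}"; under Pre_ both keys are present, so getD is exact for Python's emp[...]
def pvANameA (emp : List (String × String)) : String :=
  (PySem.Dict.mk emp).getD "first_name" "" ++ " " ++ (PySem.Dict.mk emp).getD "last_name" ""

-- first for-loop: case-insensitive match
def pvFindCase (t : String) : List (String × List (String × String)) → Option String
  | [] => none
  | (key, emp) :: rest =>
      if PySem.Str.lower (pvANameA emp) == t then some key else pvFindCase t rest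

-- second for-loop: fuzzy match; full_name_normalized is recomputed each iteration as in A
def pvFindFuzzy (full_name_lower : String) : List (String × List (String × String)) → Option String
  | [] => none
  | (key, emp) :: rest =>
      let emp_norm := PySem.Str.replace (PySem.Str.replace (PySem.Str.lower (pvANameA emp)) "jansen" "janse") "janse" "janse"
      let fn_norm := PySem.Str.replace (PySem.Str.replace full_name_lower "jansen" "janse") "janse" "janse"
      if emp_norm == fn_norm then some key else pvFindFuzzy full_name_lower rest

def find_employee_key (full_name : String) (employee_data : List (String × List (String × String))) : Option String :=
  let test_key := PySem.Str.replace full_name " " "_"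
  if employee_data.any (fun kv => kv.1 == test_key) then some test_key
  else
    let full_name_lower := PySem.Str.lower full_name
    match pvFindCase full_name_lower employee_data with
    | some key => some key
    | none => pvFindFuzzy full_name_lower employee_data

-- ===== PORT B =====
def pvANameB (emp : List (String × String)) : String :=
  (PySem.Dict.mk emp).getD "first_name" "" ++ " " ++ (PySem.Dict.mk emp).getD "last_name" ""

-- one pass: build the two first-wins indexes with setdefault
def pvBuildMaps (employee_data : List (String × List (String × String))) :
    PySem.Dict String String × PySem.Dict String String :=
  employee_data.foldl
    (fun m kv =>
      let name := PySem.Str.lower (pvANameB kv.2)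
      (m.1.setdefault name kv.1, m.2.setdefault (PySem.Str.replace name "jansen" "janse") kv.1))
    (PySem.Dict.empty, PySem.Dict.empty)

def find_employee_key_alt (full_name : String) (employee_data : List (String × List (String × String))) : Option String :=
  let test_key := PySem.Str.replace full_name " " "_"
  if employee_data.any (fun kv => kv.1 == test_key) then some test_key
  else
    let maps := pvBuildMaps employee_data
    let target := PySem.Str.lower full_name
    match maps.1.get? target with
    | some key => some key
    | none => maps.2.get? (PySem.Str.replace target "jansen" "janse")

-- ===== PRECONDITION & SPEC =====
-- Pre_ admits inputs where the exact underscore key is present (both programs return it before touching any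
-- record) or every record has 'first_name' and 'last_name'; it excludes inputs with a record missing one of
-- those keys and no exact key, where Python A raises KeyError unless an earlier match short-circuits its scan
-- while B's upfront index build raises KeyError.
def Pre_find_employee_key (full_name : String) (employee_data : List (String × List (String × String))) : Prop :=
  (employee_data.any (fun kv => kv.1 == PySem.Str.replace full_name " " "_")
   || employee_data.all
        (fun kv => kv.2.any (fun p => p.1 == "first_name") && kv.2.any (fun p => p.1 == "last_name"))) = true

instance (full_name : String) (employee_data : List (String × List (String × String))) : Decidable (Pre_find_employee_key full_name employee_data) := by unfold Pre_find_employee_key; infer_instance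

def pvWitness_find_employee_key : String × (List (String × List (String × String))) :=
  ("Jan Jansen", [("jan_jansen", [("first_name", "Jan"), ("last_name", "Jansen")])])

def Spec_find_employee_key (full_name : String) (employee_data : List (String × List (String × String))) (out : Option String) : Prop := out = find_employee_key_alt full_name employee_data
instance (full_name : String) (employee_data : List (String × List (String × String))) (out : Option String) : Decidable (Spec_find_employee_key full_name employee_data out) := by unfold Spec_find_employee_key; infer_instance

-- ===== CLAIM (what is proved, stated in full; the proofs are below) =====
def Claim_equal_find_employee_key : Prop := ∀ (full_name : String) (employee_data : List (String × List (String × String))), Dom_find_employee_key full_name employee_data → Pre_find_employee_key full_name employee_data → Spec_find_employee_key full_name employee_data (find_employee_key full_name employee_data)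

-- ===== LEMMAS AND PROOFS =====

-- s.replace(p, p) = s  (the identity replace A applies)
theorem chars_replace_go_self (p : List Char) : ∀ (fuel : Nat) (l acc : List Char),
    PySem.Chars.replace.go p p fuel l acc = acc.reverse ++ l := by
  intro fuel
  induction fuel with
  | zero => intro l acc; simp [PySem.Chars.replace.go]
  | succ n ih =>
    intro l acc
    cases l with
    | nil => simp [PySem.Chars.replace.go]
    | cons c t =>
      rw [PySem.Chars.replace.go]
      by_cases h : p.isPrefixOf (c :: t) = true
      · rw [if_pos h, ih]
        have hpre : p <+: (c :: t) := List.isPrefixOf_iff_prefix.mp h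
        obtain ⟨u, hu⟩ := hpre
        simp [← hu]
      · rw [if_neg h, ih]; simp

theorem replace_self (s p : String) (hp : p ≠ "") : PySem.Str.replace s p p = s := by
  apply String.toList_inj.mp
  rw [PySem.Str.toList_replace, PySem.Chars.replace]
  have hne : p.toList ≠ [] := fun h => hp (String.toList_eq_nil_iff.mp h)
  rw [if_neg (by simpa using hne), chars_replace_go_self]
  simp

theorem pvName_eq (emp : List (String × String)) : pvANameB emp = pvANameA emp := rfl

-- the fold step of pvBuildMaps
theorem buildMaps_foldl (l : List (String × List (String × String)))
    (d : PySem.Dict String String × PySem.Dict String String) :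
    l.foldl (fun m kv =>
      let name := PySem.Str.lower (pvANameB kv.2)
      (m.1.setdefault name kv.1, m.2.setdefault (PySem.Str.replace name "jansen" "janse") kv.1)) d
    = (l.foldl (fun m1 kv => m1.setdefault (PySem.Str.lower (pvANameB kv.2)) kv.1) d.1,
       l.foldl (fun m2 kv => m2.setdefault (PySem.Str.replace (PySem.Str.lower (pvANameB kv.2)) "jansen" "janse") kv.1) d.2) := by
  induction l generalizing d with
  | nil => rfl
  | cons kv rest ih => simp [List.foldl_cons, ih]

theorem exact_map_get (t : String) (l : List (String × List (String × String))) :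
    ∀ (d : PySem.Dict String String),
    (l.foldl (fun m1 kv => m1.setdefault (PySem.Str.lower (pvANameB kv.2)) kv.1) d).get? t
      = (d.get? t).or (pvFindCase t l) := by
  induction l with
  | nil => intro d; simp [pvFindCase]
  | cons kv rest ih =>
    intro d
    rw [List.foldl_cons, ih]
    by_cases h : t = PySem.Str.lower (pvANameA kv.2)
    · rw [pvName_eq, ← h, PySem.Dict.get?_setdefault_self]
      have : pvFindCase t (kv :: rest) = some kv.1 := by
        cases kv with
        | mk k emp => simp [pvFindCase, h]
      rw [this]
      cases hd : d.get? t <;> simp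
    · rw [pvName_eq, PySem.Dict.get?_setdefault_of_ne _ _ h]
      have : pvFindCase t (kv :: rest) = pvFindCase t rest := by
        cases kv with
        | mk k emp =>
          simp only [pvFindCase]
          rw [if_neg (by simpa using fun he => h he.symm)]
      rw [this]

theorem fuzzy_map_get (t : String) (l : List (String × List (String × String))) :
    ∀ (d : PySem.Dict String String),
    (l.foldl (fun m2 kv => m2.setdefault (PySem.Str.replace (PySem.Str.lower (pvANameB kv.2)) "jansen" "janse") kv.1) d).get? (PySem.Str.replace t "jansen" "janse")
      = (d.get? (PySem.Str.replace t "jansen" "janse")).or (pvFindFuzzy t l) := by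
  induction l with
  | nil => intro d; simp [pvFindFuzzy]
  | cons kv rest ih =>
    intro d
    rw [List.foldl_cons, ih]
    have hjanse : ("janse" : String) ≠ "" := by decide
    by_cases h : PySem.Str.replace t "jansen" "janse" = PySem.Str.replace (PySem.Str.lower (pvANameA kv.2)) "jansen" "janse"
    · rw [pvName_eq, ← h, PySem.Dict.get?_setdefault_self]
      have : pvFindFuzzy t (kv :: rest) = some kv.1 := by
        cases kv with
        | mk k emp =>
          simp only [pvFindFuzzy]
          rw [replace_self _ _ hjanse, replace_self _ _ hjanse, if_pos (by simpa using h.symm)]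
      rw [this]
      cases hd : d.get? (PySem.Str.replace t "jansen" "janse") <;> simp
    · rw [pvName_eq, PySem.Dict.get?_setdefault_of_ne _ _ h]
      have : pvFindFuzzy t (kv :: rest) = pvFindFuzzy t rest := by
        cases kv with
        | mk k emp =>
          simp only [pvFindFuzzy]
          rw [replace_self _ _ hjanse, replace_self _ _ hjanse]
          rw [if_neg (by simpa using fun he => h he.symm)]
      rw [this]

-- ===== VERDICT (by name: the statement is the Claim_ definition above) =====
theorem find_employee_key_spec : Claim_equal_find_employee_key := by
  intro full_name employee_data _ _
  unfold Spec_find_employee_key find_employee_key find_employee_key_alt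
  by_cases h : employee_data.any (fun kv => kv.1 == PySem.Str.replace full_name " " "_") = true
  · simp only [h, if_true]
  · simp only [eq_false_of_ne_true h, Bool.false_eq_true, if_false]
    rw [pvBuildMaps, buildMaps_foldl]
    rw [exact_map_get, fuzzy_map_get]
    have hemp : ∀ t : String, (PySem.Dict.empty : PySem.Dict String String).get? t = none := fun _ => rfl
    rw [hemp, hemp, Option.none_or, Option.none_or]
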